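-- pv_equiv track=rewrite | github.com/J3V2/CBS_Simulation | cbs_enhanced_random_scenario.py | build_conflict_avoidance_table
-- ===== SOURCE A (Python) =====
-- def build_conflict_avoidance_table(paths):
--     """
--     Build a Conflict Avoidance Table (CAT): a dictionary mapping time step -> set of positions.
--     """
--     cat = {}
--     if not paths:
--         return cat
--     max_len = max(len(p) for p in paths)
--     for t in range(max_len):
--         cat[t] = set()
--         for path in paths:
--             if t < len(path):
--                 cat[t].add(path[t])
--     return cat
-- ===== SOURCE B (Python) =====
-- def build_conflict_avoidance_table(paths):
--     cat = {}
--     for path in paths: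
--         for t, pos in enumerate(path):
--             cat.setdefault(t, set()).add(pos)
--     return cat
-- ===== Notes on version B (the rewrite author's own statement) =====
-- stated objective: idiomatic
-- what changed: Replaces the max_len computation and the timestep-outer scan over all paths at every t with a single pass over each path using enumerate and setdefault.
import Mathlib
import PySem

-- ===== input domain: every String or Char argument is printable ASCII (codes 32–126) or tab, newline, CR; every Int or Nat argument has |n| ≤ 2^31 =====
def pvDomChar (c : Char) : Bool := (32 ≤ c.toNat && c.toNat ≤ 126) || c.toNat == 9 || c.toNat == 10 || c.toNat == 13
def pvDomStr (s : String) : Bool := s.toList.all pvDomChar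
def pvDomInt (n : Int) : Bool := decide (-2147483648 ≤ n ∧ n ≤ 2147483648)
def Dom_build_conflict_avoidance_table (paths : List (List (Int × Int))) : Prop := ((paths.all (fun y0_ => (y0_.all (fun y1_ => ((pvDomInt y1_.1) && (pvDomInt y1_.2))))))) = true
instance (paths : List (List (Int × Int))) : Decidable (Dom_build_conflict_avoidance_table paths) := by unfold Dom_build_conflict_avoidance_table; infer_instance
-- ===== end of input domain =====

-- B replaces A's max_len pre-pass and timestep-outer scan over all paths with a single
-- enumerate/setdefault pass over each path (objective: idiomatic; same exact result).

-- ===== PORT A =====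
def build_conflict_avoidance_table (paths : List (List (Int × Int))) : List (Int × List (Int × Int)) :=
  let cat : PySem.Dict Int (PySem.Set (Int × Int)) := PySem.Dict.empty
  if paths = [] then cat.items
  else
    -- max(len(p) for p in paths); paths ≠ [] so max? is some and the .getD default is never used
    let maxLen : Int := (PySem.List.max? (paths.map (fun p => (p.length : Int))) (fun x => x)).getD 0
    ((PySem.List.pyRange 0 maxLen 1).foldl
      (fun cat t =>
        paths.foldl
          (fun c path =>
            if t < (path.length : Int) then
              -- cat[t].add(path[t]); key t was just inserted and t < len(path), so the
              -- modify default and the pyGetD default are never used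
              c.modify t PySem.Set.empty
                (fun s => PySem.Set.add s (PySem.List.pyGetD path t (0, 0)))
            else c)
          (cat.insert t PySem.Set.empty))   -- cat[t] = set()
      cat).items

-- ===== PORT B =====
def build_conflict_avoidance_table_alt (paths : List (List (Int × Int))) : List (Int × List (Int × Int)) :=
  (paths.foldl
    (fun cat path =>
      (PySem.List.enumerate path).foldl
        (fun cat tp =>
          -- cat.setdefault(t, set()).add(pos)
          (cat.setdefault tp.1 PySem.Set.empty).modify tp.1 PySem.Set.empty
            (fun s => PySem.Set.add s tp.2))
        cat)
    (PySem.Dict.empty : PySem.Dict Int (PySem.Set (Int × Int)))).items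

-- ===== PRECONDITION & SPEC =====
def Spec_build_conflict_avoidance_table (paths : List (List (Int × Int))) (out : List (Int × List (Int × Int))) : Prop := out = build_conflict_avoidance_table_alt paths
instance (paths : List (List (Int × Int))) (out : List (Int × List (Int × Int))) : Decidable (Spec_build_conflict_avoidance_table paths out) := by unfold Spec_build_conflict_avoidance_table; infer_instance

-- ===== CLAIM (what is proved, stated in full; the proofs are below) =====
def Claim_equal_build_conflict_avoidance_table : Prop := ∀ (paths : List (List (Int × Int))), Dom_build_conflict_avoidance_table paths → Spec_build_conflict_avoidance_table paths (build_conflict_avoidance_table paths)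

-- ===== LEMMAS AND PROOFS =====

-- the set of positions occupied at time t by the given paths, accumulated onto s0
def pvCell (paths : List (List (Int × Int))) (t : Int) (s0 : PySem.Set (Int × Int)) : PySem.Set (Int × Int) :=
  paths.foldl
    (fun s path => if t < (path.length : Int) then PySem.Set.add s (PySem.List.pyGetD path t (0, 0)) else s)
    s0

-- the longest path length
def pvMN (paths : List (List (Int × Int))) : Nat := paths.foldl (fun a p => max a p.length) 0

-- the common table both programs compute
def pvTbl (paths : List (List (Int × Int))) : List (Int × PySem.Set (Int × Int)) :=
  (PySem.List.pyRange 0 (pvMN paths : Int) 1).map (fun t => (t, pvCell paths t PySem.Set.empty))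

-- B's loop body: setdefault-then-add is insert of the accumulated set
def pvGI (cat : PySem.Dict Int (PySem.Set (Int × Int))) (tp : Int × (Int × Int)) : PySem.Dict Int (PySem.Set (Int × Int)) :=
  cat.insert tp.1 (PySem.Set.add (cat.getD tp.1 PySem.Set.empty) tp.2)

lemma pv_g_insert (d : PySem.Dict Int (PySem.Set (Int × Int))) (tp : Int × (Int × Int)) :
    (d.setdefault tp.1 PySem.Set.empty).modify tp.1 PySem.Set.empty (fun s => PySem.Set.add s tp.2)
      = pvGI d tp := by
  by_cases h : d.contains tp.1 = true
  · rw [PySem.Dict.setdefault_of_contains d _ h]; rfl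
  · have h' : d.contains tp.1 = false := by simpa using h
    rw [PySem.Dict.setdefault_of_not_contains d _ h']
    simp [PySem.Dict.modify, pvGI, PySem.Dict.getD_insert_self, PySem.Dict.insert_insert_self,
      PySem.Dict.getD_of_not_contains d _ h']

lemma pv_contains_of_get? (d : PySem.Dict Int (PySem.Set (Int × Int))) (t : Int)
    (s0 : PySem.Set (Int × Int)) (h : d.get? t = some s0) : d.contains t = true := by
  rw [PySem.Dict.contains_eq_isSome_get?, h]; rfl

lemma pv_keys_insert_contained (d : PySem.Dict Int (PySem.Set (Int × Int))) (t : Int)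
    (v : PySem.Set (Int × Int)) (h : d.contains t = true) : (d.insert t v).keys = d.keys := by
  simp only [PySem.Dict.keys, PySem.Dict.items_insert_of_contains d v h, List.map_map]
  refine List.map_congr_left (fun e _ => ?_)
  by_cases he : e.1 = t <;> simp [he]

-- value of the entry with key t when keys are nodup
lemma pv_entry_val (d : PySem.Dict Int (PySem.Set (Int × Int))) (t : Int)
    (s0 : PySem.Set (Int × Int)) (hnd : d.keys.Nodup) (h : d.get? t = some s0)
    (e : Int × PySem.Set (Int × Int)) (he : e ∈ d.items) (ht : e.1 = t) : e = (t, s0) := by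
  have : d.get? e.1 = some e.2 := PySem.Dict.get?_of_mem_items d (by simpa using he) hnd
  rw [ht, h] at this
  cases e; simp_all

-- A's inner loop over paths at a fixed time t
lemma pv_innerA (t : Int) :
    ∀ (paths : List (List (Int × Int))) (d : PySem.Dict Int (PySem.Set (Int × Int)))
      (s0 : PySem.Set (Int × Int)), d.keys.Nodup → d.get? t = some s0 →
      (paths.foldl
        (fun c path =>
          if t < (path.length : Int) then
            c.modify t PySem.Set.empty (fun s => PySem.Set.add s (PySem.List.pyGetD path t (0, 0)))
          else c) d).items
        = d.items.map (fun e => if e.1 = t then (t, pvCell paths t s0) else e) := by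
  intro paths
  induction paths with
  | nil =>
    intro d s0 hnd h
    simp only [List.foldl_nil]
    symm
    refine (List.map_congr_left fun e he => ?_).trans (List.map_id _)
    by_cases ht : e.1 = t
    · have := pv_entry_val d t s0 hnd h e he ht
      rw [this]
      simp [pvCell]
    · simp [ht]
  | cons P Ps ih =>
    intro d s0 hnd h
    simp only [List.foldl_cons]
    by_cases hc : t < (P.length : Int)
    · rw [if_pos hc]
      have hgd : d.getD t PySem.Set.empty = s0 := PySem.Dict.getD_of_get?_eq_some d _ h
      have hct : d.contains t = true := pv_contains_of_get? d t s0 h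
      have hmod : d.modify t PySem.Set.empty
            (fun s => PySem.Set.add s (PySem.List.pyGetD P t (0, 0)))
          = d.insert t (PySem.Set.add s0 (PySem.List.pyGetD P t (0, 0))) := by
        simp only [PySem.Dict.modify]
        rw [PySem.Dict.getD_of_get?_eq_some d _ h]
      rw [hmod]
      have hnd' : (d.insert t (PySem.Set.add s0 (PySem.List.pyGetD P t (0, 0)))).keys.Nodup := by
        rw [pv_keys_insert_contained d t _ hct]; exact hnd
      have hget' : (d.insert t (PySem.Set.add s0 (PySem.List.pyGetD P t (0, 0)))).get? t
          = some (PySem.Set.add s0 (PySem.List.pyGetD P t (0, 0))) :=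
        PySem.Dict.get?_insert_self d t _
      rw [ih _ _ hnd' hget']
      rw [PySem.Dict.items_insert_of_contains d _ hct, List.map_map]
      refine List.map_congr_left (fun e he => ?_)
      by_cases ht : e.1 = t
      · simp [Function.comp, ht, pvCell, hc]
      · simp [Function.comp, ht]
    · rw [if_neg hc, ih d s0 hnd h]
      refine List.map_congr_left (fun e he => ?_)
      by_cases ht : e.1 = t
      · simp [ht, pvCell, hc]
      · simp [ht]

-- A's outer loop over timesteps
lemma pv_outerA (paths : List (List (Int × Int))) :
    ∀ (n : Nat),
      ((PySem.List.pyRange 0 (n : Int) 1).foldl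
        (fun cat t =>
          paths.foldl
            (fun c path =>
              if t < (path.length : Int) then
                c.modify t PySem.Set.empty (fun s => PySem.Set.add s (PySem.List.pyGetD path t (0, 0)))
              else c)
            (cat.insert t PySem.Set.empty))
        (PySem.Dict.empty : PySem.Dict Int (PySem.Set (Int × Int))))
        = PySem.Dict.mk ((PySem.List.pyRange 0 (n : Int) 1).map (fun t => (t, pvCell paths t PySem.Set.empty))) := by
  intro n
  induction n with
  | zero =>
    rw [Nat.cast_zero, PySem.List.pyRange_one_eq_nil le_rfl]
    rfl
  | succ n ihn =>
    have hcast : ((n + 1 : Nat) : Int) = (n : Int) + 1 := by push_cast; ring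
    rw [hcast, PySem.List.pyRange_one_succ_right (by positivity), List.foldl_append, ihn,
      List.map_append, List.foldl_cons, List.foldl_nil]
    set L := (PySem.List.pyRange 0 (n : Int) 1).map (fun t => (t, pvCell paths t PySem.Set.empty)) with hL
    set D : PySem.Dict Int (PySem.Set (Int × Int)) := PySem.Dict.mk L with hD
    have hkeys : D.keys = PySem.List.pyRange 0 (n : Int) 1 := by
      simp only [hD, PySem.Dict.keys, hL, List.map_map]
      exact (List.map_congr_left (fun t _ => rfl)).trans (List.map_id _)
    have hnmem : (n : Int) ∉ D.keys := by
      rw [hkeys, PySem.List.mem_pyRange_one]; omega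
    have hct : D.contains (n : Int) = false := by
      rw [PySem.Dict.contains_eq_decide_mem_keys]; simp [hnmem]
    have hit1 : (D.insert (n : Int) PySem.Set.empty).items = L ++ [((n : Int), PySem.Set.empty)] :=
      PySem.Dict.items_insert_of_not_contains D _ hct
    have hfst : L.map (fun x => x.1) = PySem.List.pyRange 0 (n : Int) 1 := hkeys
    have hkeys1 : (D.insert (n : Int) PySem.Set.empty).keys = PySem.List.pyRange 0 ((n : Int) + 1) 1 := by
      simp only [PySem.Dict.keys, hit1, List.map_append, List.map_cons, List.map_nil]
      rw [hfst, ← PySem.List.pyRange_one_succ_right (by positivity)]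
    have hnd1 : (D.insert (n : Int) PySem.Set.empty).keys.Nodup := by
      rw [hkeys1]; exact PySem.List.nodup_pyRange_one _ _
    have hget1 : (D.insert (n : Int) PySem.Set.empty).get? (n : Int) = some PySem.Set.empty :=
      PySem.Dict.get?_insert_self D _ _
    apply PySem.Dict.ext
    rw [pv_innerA (n : Int) paths _ PySem.Set.empty hnd1 hget1, hit1, List.map_append]
    refine congrArg₂ (· ++ ·) ?_ (by simp)
    refine (List.map_congr_left fun e he => ?_).trans (List.map_id _)
    obtain ⟨t, htmem, rfl⟩ := List.mem_map.1 he
    have htn : t < (n : Int) := (PySem.List.mem_pyRange_one.mp htmem).2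
    rw [if_neg (by omega)]
    rfl

def pvMaxStep (acc : Option Int) (x : Int) : Option Int :=
  match acc with
  | none => some x
  | some m => if m < x then some x else some m

lemma pv_max?_eq_foldl (xs : List Int) :
    PySem.List.max? xs (fun x => x) = xs.foldl pvMaxStep none := by
  unfold PySem.List.max? pvMaxStep
  congr 1
  funext acc x
  cases acc <;> rfl

lemma pv_max_fold :
    ∀ (Ps : List (List (Int × Int))) (a : Nat),
      List.foldl pvMaxStep (some (a : Int)) (Ps.map (fun p => (p.length : Int)))
        = some ((Ps.foldl (fun m p => max m p.length) a : Nat) : Int) := by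
  intro Ps
  induction Ps with
  | nil => intro a; rfl
  | cons q Qs ih =>
    intro a
    simp only [List.map_cons, List.foldl_cons]
    have h1 : pvMaxStep (some (a : Int)) ((q.length : Int))
        = some ((max a q.length : Nat) : Int) := by
      show (if (a : Int) < (q.length : Int) then some ((q.length : Int)) else some ((a : Int))) = _
      by_cases h : a < q.length
      · rw [if_pos (by exact_mod_cast h)]
        congr 1
        simp [Nat.max_eq_right h.le]
      · rw [if_neg (by exact_mod_cast h)]
        congr 1
        simp [Nat.max_eq_left (Nat.le_of_not_lt h)]
    rw [h1]
    exact ih (max a q.length)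

lemma pv_max_eq (P : List (Int × Int)) (Ps : List (List (Int × Int))) :
    (PySem.List.max? ((P :: Ps).map (fun p => (p.length : Int))) (fun x => x)).getD 0
      = (pvMN (P :: Ps) : Int) := by
  rw [pv_max?_eq_foldl]
  simp only [List.map_cons, List.foldl_cons]
  rw [show pvMaxStep none ((P.length : Int)) = some ((P.length : Int)) from rfl]
  rw [pv_max_fold Ps P.length]
  simp only [pvMN, List.foldl_cons, Nat.zero_max, Option.getD_some]

lemma pv_A_eq (paths : List (List (Int × Int))) :
    build_conflict_avoidance_table paths = pvTbl paths := by
  cases paths with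
  | nil =>
    simp [build_conflict_avoidance_table, pvTbl, pvMN,
      PySem.List.pyRange_one_eq_nil le_rfl]
    rfl
  | cons P Ps =>
    have hne : (P :: Ps) ≠ [] := by simp
    simp only [build_conflict_avoidance_table, if_neg hne]
    rw [pv_max_eq P Ps, pv_outerA (P :: Ps) (pvMN (P :: Ps))]
    rfl

-- ===== B side =====

lemma pv_lens_le (ps : List (List (Int × Int))) (path : List (Int × Int)) (h : path ∈ ps) :
    path.length ≤ pvMN ps := by
  have := (PySem.List.le_foldl_max (ps.map List.length) 0).2 path.length (List.mem_map_of_mem h)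
  simpa [pvMN, List.foldl_map] using this

lemma pv_cell_ge (ps : List (List (Int × Int))) (t : Int) (s0 : PySem.Set (Int × Int))
    (h : ∀ path ∈ ps, (path.length : Int) ≤ t) : pvCell ps t s0 = s0 := by
  induction ps generalizing s0 with
  | nil => rfl
  | cons P Ps ih =>
    have hP : ¬ t < (P.length : Int) := by have := h P (by simp); omega
    simp only [pvCell, List.foldl_cons, if_neg hP]
    exact ih s0 (fun q hq => h q (List.mem_cons_of_mem _ hq))

lemma pv_getD_cons_pos (x : Int × Int) (xs : List (Int × Int)) (i : Int) (h : 1 ≤ i) :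
    PySem.List.pyGetD (x :: xs) i (0, 0) = PySem.List.pyGetD xs (i - 1) (0, 0) := by
  obtain ⟨k, rfl⟩ : ∃ k : Nat, i = ((k + 1 : Nat) : Int) := ⟨(i - 1).toNat, by omega⟩
  have h1 : ((k + 1 : Nat) : Int) - 1 = ((k : Nat) : Int) := by push_cast; ring
  rw [h1, PySem.List.pyGetD_natCast, PySem.List.pyGetD_natCast]
  rfl

lemma pv_getD_zero (x : Int × Int) (xs : List (Int × Int)) :
    PySem.List.pyGetD (x :: xs) 0 (0, 0) = x := by
  have : (0 : Int) = ((0 : Nat) : Int) := rfl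
  rw [this, PySem.List.pyGetD_natCast]
  rfl

lemma pv_getD_take (p : List (Int × Int)) (K : Nat) (t : Int) (h0 : 0 ≤ t) (h : t < (K : Int)) :
    PySem.List.pyGetD (p.take K) t (0, 0) = PySem.List.pyGetD p t (0, 0) := by
  obtain ⟨n, rfl⟩ : ∃ n : Nat, t = (n : Int) := ⟨t.toNat, by omega⟩
  rw [PySem.List.pyGetD_natCast, PySem.List.pyGetD_natCast]
  have hn : n < K := by exact_mod_cast h
  simp [List.getD, hn]

lemma pv_getD_drop (p : List (Int × Int)) (K : Nat) (t : Int) (h : (K : Int) ≤ t) :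
    PySem.List.pyGetD (p.drop K) (t - (K : Int)) (0, 0) = PySem.List.pyGetD p t (0, 0) := by
  obtain ⟨n, rfl⟩ : ∃ n : Nat, t = ((K + n : Nat) : Int) := ⟨(t - K).toNat, by omega⟩
  have h1 : ((K + n : Nat) : Int) - (K : Int) = ((n : Nat) : Int) := by push_cast; ring
  rw [h1, PySem.List.pyGetD_natCast, PySem.List.pyGetD_natCast]
  simp [List.getD, List.getElem?_drop]

-- phase 1: all indices hit existing keys
lemma pv_phaseA :
    ∀ (q : List (Int × Int)) (s K : Nat) (d : PySem.Dict Int (PySem.Set (Int × Int))),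
      d.keys = PySem.List.pyRange 0 (K : Int) 1 → s + q.length ≤ K →
      ((PySem.List.enumerate q (s : Int)).foldl pvGI d).items
        = d.items.map (fun e =>
            if (s : Int) ≤ e.1 ∧ e.1 < (s : Int) + q.length then
              (e.1, PySem.Set.add e.2 (PySem.List.pyGetD q (e.1 - s) (0, 0)))
            else e) := by
  intro q
  induction q with
  | nil =>
    intro s K d hk hle
    simp only [PySem.List.enumerate_nil, List.foldl_nil, List.length_nil, Nat.cast_zero, add_zero]
    symm
    refine (List.map_congr_left fun e he => ?_).trans (List.map_id _)
    rw [if_neg (by omega)]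
    rfl
  | cons x xs ih =>
    intro s K d hk hle
    simp only [List.length_cons] at hle
    rw [PySem.List.enumerate_cons, List.foldl_cons]
    have hnd : d.keys.Nodup := by rw [hk]; exact PySem.List.nodup_pyRange_one _ _
    have hmem : (s : Int) ∈ d.keys := by rw [hk, PySem.List.mem_pyRange_one]; omega
    have hct : d.contains (s : Int) = true := by
      rw [PySem.Dict.contains_eq_decide_mem_keys]; simp [hmem]
    have hget : d.get? (s : Int) = some (d.getD (s : Int) PySem.Set.empty) := by
      rw [PySem.Dict.contains_eq_isSome_get?] at hct
      cases hg : d.get? (s : Int) with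
      | none => rw [hg] at hct; simp at hct
      | some v => rw [PySem.Dict.getD_eq_get?_getD, hg]; rfl
    have hinit : pvGI d ((s : Int), x)
        = d.insert (s : Int) (PySem.Set.add (d.getD (s : Int) PySem.Set.empty) x) := rfl
    have hit1 : (d.insert (s : Int) (PySem.Set.add (d.getD (s : Int) PySem.Set.empty) x)).items
        = d.items.map (fun e =>
            if e.1 == (s : Int) then ((s : Int), PySem.Set.add (d.getD (s : Int) PySem.Set.empty) x) else e) :=
      PySem.Dict.items_insert_of_contains d _ hct
    have hk1 : (d.insert (s : Int) (PySem.Set.add (d.getD (s : Int) PySem.Set.empty) x)).keys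
        = PySem.List.pyRange 0 (K : Int) 1 := by
      rw [pv_keys_insert_contained d _ _ hct, hk]
    have hcast : (s : Int) + 1 = ((s + 1 : Nat) : Int) := by push_cast; ring
    rw [hinit, hcast, ih (s + 1) K _ hk1 (by omega), hit1, List.map_map]
    refine List.map_congr_left (fun e he => ?_)
    obtain ⟨t, v⟩ := e
    dsimp only [Function.comp_apply]
    by_cases hts : t = (s : Int)
    · subst hts
      have hv : v = d.getD ((s : Int)) PySem.Set.empty := by
        have h2 := pv_entry_val d _ _ hnd hget ((s : Int), v) he rfl
        simpa using h2
      subst hv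
      rw [if_pos (show (((s : Int)) == ((s : Int))) = true by simp)]
      dsimp only
      rw [if_neg (by push_cast [List.length_cons]; omega),
        if_pos (by push_cast [List.length_cons]; omega), sub_self, pv_getD_zero]
    · rw [if_neg (show ¬ ((t == (s : Int)) = true) by simp [hts])]
      dsimp only
      by_cases hin : (s : Int) ≤ t ∧ t < (s : Int) + ((x :: xs).length : Int)
      · rw [if_pos (by push_cast [List.length_cons] at hin ⊢; omega), if_pos hin]
        have h1 : (1 : Int) ≤ t - (s : Int) := by omega
        rw [pv_getD_cons_pos x xs _ h1]
        have h2 : t - (s : Int) - 1 = t - ((s + 1 : Nat) : Int) := by push_cast; ring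
        rw [h2]
      · rw [if_neg (by push_cast [List.length_cons] at hin ⊢; omega), if_neg hin]

-- phase 2: all indices are fresh keys, appended in order
lemma pv_phaseB :
    ∀ (q : List (Int × Int)) (s : Nat) (d : PySem.Dict Int (PySem.Set (Int × Int))),
      d.keys = PySem.List.pyRange 0 (s : Int) 1 →
      ((PySem.List.enumerate q (s : Int)).foldl pvGI d).items
        = d.items ++ (PySem.List.enumerate q (s : Int)).map (fun e => (e.1, PySem.Set.add PySem.Set.empty e.2)) := by
  intro q
  induction q with
  | nil => intro s d hk; simp [PySem.List.enumerate_nil]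
  | cons x xs ih =>
    intro s d hk
    rw [PySem.List.enumerate_cons, List.foldl_cons, List.map_cons]
    have hnmem : (s : Int) ∉ d.keys := by rw [hk, PySem.List.mem_pyRange_one]; omega
    have hct : d.contains (s : Int) = false := by
      rw [PySem.Dict.contains_eq_decide_mem_keys]; simp [hnmem]
    have hgd : d.getD (s : Int) PySem.Set.empty = PySem.Set.empty :=
      PySem.Dict.getD_of_not_contains d _ hct
    have hinit : pvGI d ((s : Int), x) = d.insert (s : Int) (PySem.Set.add PySem.Set.empty x) := by
      show d.insert (s : Int) (PySem.Set.add (d.getD (s : Int) PySem.Set.empty) x) = _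
      rw [hgd]
    have hit1 : (d.insert (s : Int) (PySem.Set.add PySem.Set.empty x)).items
        = d.items ++ [((s : Int), PySem.Set.add PySem.Set.empty x)] :=
      PySem.Dict.items_insert_of_not_contains d _ hct
    have hfst : d.items.map (fun x => x.1) = PySem.List.pyRange 0 (s : Int) 1 := hk
    have hk1 : (d.insert (s : Int) (PySem.Set.add PySem.Set.empty x)).keys
        = PySem.List.pyRange 0 ((s + 1 : Nat) : Int) 1 := by
      simp only [PySem.Dict.keys, hit1, List.map_append, List.map_cons, List.map_nil]
      rw [hfst]
      rw [show ((s + 1 : Nat) : Int) = (s : Int) + 1 by push_cast; ring]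
      rw [← PySem.List.pyRange_one_succ_right (by positivity)]
    have hcast : (s : Int) + 1 = ((s + 1 : Nat) : Int) := by push_cast; ring
    rw [hinit, hcast, ih (s + 1) _ hk1, hit1]
    simp [List.append_assoc]

lemma pv_enum_map :
    ∀ (xs : List (Int × Int)) (s : Nat),
      (PySem.List.enumerate xs (s : Int)).map (fun e => (e.1, PySem.Set.add PySem.Set.empty e.2))
        = (PySem.List.pyRange (s : Int) ((s : Int) + xs.length) 1).map
            (fun t => (t, PySem.Set.add PySem.Set.empty (PySem.List.pyGetD xs (t - s) (0, 0)))) := by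
  intro xs
  induction xs with
  | nil =>
    intro s
    simp [PySem.List.enumerate_nil, PySem.List.pyRange_one_eq_nil le_rfl]
  | cons x xs ih =>
    intro s
    rw [PySem.List.enumerate_cons, List.map_cons]
    rw [PySem.List.pyRange_one_cons (by push_cast [List.length_cons]; omega), List.map_cons]
    congr 1
    · rw [sub_self, pv_getD_zero]
    · have hcast : (s : Int) + 1 = ((s + 1 : Nat) : Int) := by push_cast; ring
      rw [hcast, ih (s + 1)]
      have hend : ((s + 1 : Nat) : Int) + (xs.length : Int) = (s : Int) + ((x :: xs).length : Int) := by
        push_cast [List.length_cons]; ring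
      rw [hend]
      refine List.map_congr_left (fun t ht => ?_)
      have hts := PySem.List.mem_pyRange_one.mp ht
      have h1 : (1 : Int) ≤ t - (s : Int) := by push_cast at hts; omega
      rw [pv_getD_cons_pos x xs _ h1]
      have h2 : t - (s : Int) - 1 = t - ((s + 1 : Nat) : Int) := by push_cast; ring
      rw [h2]

lemma pv_MN_append (ps : List (List (Int × Int))) (p : List (Int × Int)) :
    pvMN (ps ++ [p]) = max (pvMN ps) p.length := by
  simp [pvMN, List.foldl_append]

lemma pv_keys_map_if (L : List (Int × PySem.Set (Int × Int)))
    (c : Int × PySem.Set (Int × Int) → Prop) [DecidablePred c]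
    (val : Int × PySem.Set (Int × Int) → PySem.Set (Int × Int)) :
    (L.map (fun e => if c e then (e.1, val e) else e)).map (fun x => x.1)
      = L.map (fun x => x.1) := by
  rw [List.map_map]
  refine List.map_congr_left fun e he => ?_
  dsimp only [Function.comp_apply]
  by_cases hc : c e
  · rw [if_pos hc]
  · rw [if_neg hc]

lemma pv_B_items :
    ∀ (paths : List (List (Int × Int))),
      (paths.foldl (fun cat path => (PySem.List.enumerate path).foldl pvGI cat)
        (PySem.Dict.empty : PySem.Dict Int (PySem.Set (Int × Int)))).items = pvTbl paths := by
  intro paths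
  induction paths using List.reverseRecOn with
  | nil => simp [pvTbl, pvMN, PySem.List.pyRange_one_eq_nil le_rfl]; rfl
  | append_singleton ps p ih =>
    rw [List.foldl_append, List.foldl_cons, List.foldl_nil]
    set D := ps.foldl (fun cat path => (PySem.List.enumerate path).foldl pvGI cat)
      (PySem.Dict.empty : PySem.Dict Int (PySem.Set (Int × Int))) with hD
    have hkeys : D.keys = PySem.List.pyRange 0 (pvMN ps : Int) 1 := by
      simp only [PySem.Dict.keys, ih, pvTbl, List.map_map]
      exact (List.map_congr_left fun t _ => rfl).trans (List.map_id _)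
    have h0 : PySem.List.enumerate p = PySem.List.enumerate p (((0 : Nat) : Int)) := by norm_num
    have hcell : ∀ t : Int, pvCell (ps ++ [p]) t PySem.Set.empty
        = if t < (p.length : Int) then
            PySem.Set.add (pvCell ps t PySem.Set.empty) (PySem.List.pyGetD p t (0, 0))
          else pvCell ps t PySem.Set.empty := by
      intro t
      simp [pvCell, List.foldl_append]
    by_cases hle : p.length ≤ pvMN ps
    · rw [h0, pv_phaseA p 0 (pvMN ps) D hkeys (by simpa using hle), ih]
      unfold pvTbl
      rw [pv_MN_append, Nat.max_eq_left hle, List.map_map]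
      refine List.map_congr_left fun t ht => ?_
      have hts := PySem.List.mem_pyRange_one.mp ht
      simp only [Function.comp_apply, Nat.cast_zero, zero_add, sub_zero]
      rw [hcell t]
      by_cases hc : t < (p.length : Int)
      · rw [if_pos ⟨hts.1, hc⟩, if_pos hc]
      · rw [if_neg (by omega), if_neg hc]
    · rw [not_le] at hle
      rw [h0, show PySem.List.enumerate p (((0 : Nat) : Int))
          = PySem.List.enumerate (p.take (pvMN ps) ++ p.drop (pvMN ps)) (((0 : Nat) : Int)) by
            rw [List.take_append_drop]]
      rw [PySem.List.enumerate_append, List.foldl_append]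
      have hlt : (p.take (pvMN ps)).length = pvMN ps := by
        simp [List.length_take, Nat.min_eq_left hle.le]
      have hD1it : ((PySem.List.enumerate (p.take (pvMN ps)) (((0 : Nat) : Int))).foldl pvGI D).items
          = D.items.map (fun e =>
              if ((0 : Nat) : Int) ≤ e.1 ∧ e.1 < ((0 : Nat) : Int) + ((p.take (pvMN ps)).length : Int) then
                (e.1, PySem.Set.add e.2 (PySem.List.pyGetD (p.take (pvMN ps)) (e.1 - ((0 : Nat) : Int)) (0, 0)))
              else e) :=
        pv_phaseA (p.take (pvMN ps)) 0 (pvMN ps) D hkeys (by omega)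
      have hD1k : ((PySem.List.enumerate (p.take (pvMN ps)) (((0 : Nat) : Int))).foldl pvGI D).keys
          = PySem.List.pyRange 0 (pvMN ps : Int) 1 := by
        show ((PySem.List.enumerate (p.take (pvMN ps)) (((0 : Nat) : Int))).foldl pvGI D).items.map (fun x => x.1)
          = PySem.List.pyRange 0 (pvMN ps : Int) 1
        rw [hD1it, pv_keys_map_if]
        exact hkeys
      rw [show ((0 : Nat) : Int) + ((p.take (pvMN ps)).length : Int) = ((pvMN ps : Nat) : Int) by
        rw [hlt]; push_cast; ring]
      rw [pv_phaseB (p.drop (pvMN ps)) (pvMN ps) _ hD1k, pv_enum_map, hD1it, ih]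
      unfold pvTbl
      rw [pv_MN_append, Nat.max_eq_right hle.le]
      rw [PySem.List.pyRange_one_append 0 (pvMN ps : Int) (p.length : Int) (by positivity)
        (by exact_mod_cast hle.le), List.map_append]
      congr 1
      · rw [List.map_map]
        refine List.map_congr_left fun t ht => ?_
        have hts := PySem.List.mem_pyRange_one.mp ht
        simp only [Function.comp_apply, Nat.cast_zero, zero_add, sub_zero]
        rw [if_pos ⟨hts.1, by rw [hlt]; exact hts.2⟩]
        rw [pv_getD_take p (pvMN ps) t hts.1 hts.2, hcell t, if_pos (by push_cast; omega)]
      · rw [show ((pvMN ps : Nat) : Int) + ((p.drop (pvMN ps)).length : Int) = (p.length : Int) by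
          push_cast [List.length_drop]; omega]
        refine List.map_congr_left fun t ht => ?_
        have hts := PySem.List.mem_pyRange_one.mp ht
        have hce : pvCell ps t PySem.Set.empty = PySem.Set.empty :=
          pv_cell_ge ps t _ (fun q hq => by
            have := pv_lens_le ps q hq
            omega)
        rw [pv_getD_drop p (pvMN ps) t hts.1, hcell t, hce, if_pos hts.2]

lemma pv_alt_eq (paths : List (List (Int × Int))) :
    build_conflict_avoidance_table_alt paths
      = (paths.foldl (fun cat path => (PySem.List.enumerate path).foldl pvGI cat)
          (PySem.Dict.empty : PySem.Dict Int (PySem.Set (Int × Int)))).items := by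
  have hfun : (fun (cat : PySem.Dict Int (PySem.Set (Int × Int))) (tp : Int × (Int × Int)) =>
      (cat.setdefault tp.1 PySem.Set.empty).modify tp.1 PySem.Set.empty
        (fun s => PySem.Set.add s tp.2)) = pvGI := by
    funext c tp; exact pv_g_insert c tp
  unfold build_conflict_avoidance_table_alt
  rw [hfun]

-- ===== VERDICT (by name: the statement is the Claim_ definition above) =====
theorem build_conflict_avoidance_table_spec : Claim_equal_build_conflict_avoidance_table := by
  intro paths _
  unfold Spec_build_conflict_avoidance_table
  rw [pv_A_eq, pv_alt_eq, pv_B_items]
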